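-- pv_equiv track=rewrite | github.com/dajeong-kimm/algorithm | 프로그래머스/2/17687. ［3차］ n진수 게임/［3차］ n진수 게임.py | solution
-- ===== SOURCE A (Python) =====
-- def make_str(num,n):
--     answer=''
--     if num == 0:
--         return '0'
--     if n==10:
--         return str(num)
--     arr = [str(i) for i in range(10)]
--     arr.extend(['A','B','C','D','E','F'])
--     while num>0:
--         answer += arr[num%n]
--         num = num//n
--     return answer[::-1]
--
-- def solution(n, t, m, p):
--     string = ''
--     num = 0
--     while len(string)<=(m*t):
--         string += make_str(num,n)
--         num += 1
--
--     string = list(string)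
--     answer = ''
--     count = 0
--     while len(answer)<t:
--         answer += string[p-1+(count)*m]
--         count += 1
--     return answer
-- ===== SOURCE B (Python) =====
-- def solution(n, t, m, p):
--     # Instead of materialising the concatenated base-n string, compute each
--     # needed character directly: locate the owning number by skipping whole
--     # digit-length blocks, then read the digit inside that number.
--     digits16 = "0123456789ABCDEF"
--
--     def char_at(idx):
--         d = 1        # digit length of numbers in the current block
--         start = 0    # first number of the current block
--         count = n    # how many numbers the current block holds
--         while idx >= count * d:
--             idx -= count * d
--             d += 1
--             start = n if start == 0 else start * n
--             count = start * (n - 1)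
--         q = start + idx // d
--         r = idx % d
--         if q == 0:
--             digs = [0]
--         else:
--             digs = []
--             while q > 0:
--                 digs.append(q % n)
--                 q //= n
--             digs.reverse()
--         return digits16[digs[r]]
--
--     return ''.join(char_at(p - 1 + i * m) for i in range(t))
-- ===== Notes on version B (the rewrite author's own statement) =====
-- stated objective: faster
-- what changed: B never builds the concatenated base-n string: for each of the t target indices it locates the owning number by skipping whole digit-length blocks arithmetically and extracts the wanted digit by repeated division, versus A's concatenate-everything-then-index approach.
-- outside the precondition, e.g. on solution(-2, 1, 1, 1): A returns '0', B raises IndexError; on solution(2, 1, 1, 3): A raises IndexError, B returns '1'; on solution(2, 1, 3, 4): A returns '0', B returns '0'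
import Mathlib
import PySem

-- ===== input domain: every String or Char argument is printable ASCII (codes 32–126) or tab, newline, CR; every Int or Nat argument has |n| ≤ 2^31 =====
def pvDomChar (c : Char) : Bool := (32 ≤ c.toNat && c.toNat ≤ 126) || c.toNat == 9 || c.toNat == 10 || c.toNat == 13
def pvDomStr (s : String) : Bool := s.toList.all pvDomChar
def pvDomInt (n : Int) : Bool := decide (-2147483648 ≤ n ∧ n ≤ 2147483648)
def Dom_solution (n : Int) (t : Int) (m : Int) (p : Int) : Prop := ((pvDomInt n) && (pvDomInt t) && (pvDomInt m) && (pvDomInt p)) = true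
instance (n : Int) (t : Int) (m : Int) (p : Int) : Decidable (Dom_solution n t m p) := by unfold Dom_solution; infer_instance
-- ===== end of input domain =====

-- B replaces A's "concatenate the whole base-n string, then index into it" by per-target
-- index arithmetic over digit-length blocks (objective: faster — no string is materialised).

-- ===== PORT A =====
-- arr = [str(i) for i in range(10)] + ['A'..'F']  (strings as List Char)
def pvArrA : List (List Char) :=
  ((PySem.List.pyRange 0 10 1).map PySem.Int.toChars) ++ [['A'], ['B'], ['C'], ['D'], ['E'], ['F']]

-- `while num > 0: answer += arr[num%n]; num //= n` — fuel num.toNat+1 suffices (num strictly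
-- decreases for n ≥ 2; for n outside Pre_ Python raises or diverges here)
def pvMakeStrLoop (n : Int) : Nat → Int → List Char → List Char
  | 0, _, answer => answer
  | fuel+1, num, answer =>
    if 0 < num then
      pvMakeStrLoop n fuel (PySem.Int.floordiv num n)
        (answer ++ PySem.List.pyGetD pvArrA (PySem.Int.mod num n) [])
    else answer

def pvMakeStr (num n : Int) : List Char :=
  if num = 0 then ['0']
  else if n = 10 then PySem.Int.toChars num       -- str(num)
  else (pvMakeStrLoop n (num.toNat + 1) num []).reverse   -- answer[::-1]

-- `while len(string) <= m*t: string += make_str(num, n); num += 1` — each iteration adds ≥ 1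
-- char under Pre_, so fuel (m*t).toNat + 2 suffices
def pvBuildLoop (n mt : Int) : Nat → Int → List Char → List Char
  | 0, _, s => s
  | fuel+1, num, s =>
    if (s.length : Int) ≤ mt then pvBuildLoop n mt fuel (num + 1) (s ++ pvMakeStr num n)
    else s

-- `while len(answer) < t: answer += string[p-1+count*m]; count += 1` — one char per step,
-- fuel t.toNat + 1 suffices; the indexing is in range under Pre_ (Python raises outside)
def pvPickLoop (t m p : Int) (string : List Char) : Nat → Int → List Char → List Char
  | 0, _, ans => ans
  | fuel+1, count, ans =>
    if (ans.length : Int) < t then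
      pvPickLoop t m p string fuel (count + 1)
        (ans ++ [PySem.List.pyGetD string (p - 1 + count * m) ' '])
    else ans

def solution (n : Int) (t : Int) (m : Int) (p : Int) : String :=
  String.ofList
    (pvPickLoop t m p (pvBuildLoop n (m * t) ((m * t).toNat + 2) 0 []) (t.toNat + 1) 0 [])

-- ===== PORT B =====
def pvDigits16 : List Char :=
  ['0','1','2','3','4','5','6','7','8','9','A','B','C','D','E','F']

-- `while idx >= count*d: idx -= count*d; d += 1; start = n if start == 0 else start*n;
--  count = start*(n-1)` — idx drops by ≥ 2 each round for n ≥ 2, fuel idx.toNat+1 suffices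
def pvWalk (n : Int) : Nat → Int → Int → Int → Int → Int × Int × Int
  | 0, idx, d, start, _ => (idx, d, start)
  | fuel+1, idx, d, start, count =>
    if count * d ≤ idx then
      pvWalk n fuel (idx - count * d) (d + 1) (if start = 0 then n else start * n)
        ((if start = 0 then n else start * n) * (n - 1))
    else (idx, d, start)

-- `while q > 0: digs.append(q % n); q //= n`
def pvDigsLoop (n : Int) : Nat → Int → List Int → List Int
  | 0, _, digs => digs
  | fuel+1, q, digs =>
    if 0 < q then pvDigsLoop n fuel (PySem.Int.floordiv q n) (digs ++ [PySem.Int.mod q n])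
    else digs

def pvCharAt (n idx : Int) : Char :=
  let w := pvWalk n (idx.toNat + 1) idx 1 0 n
  let q := w.2.2 + PySem.Int.floordiv w.1 w.2.1
  let r := PySem.Int.mod w.1 w.2.1
  let digs := if q = 0 then [(0 : Int)] else (pvDigsLoop n (q.toNat + 1) q []).reverse
  PySem.List.pyGetD pvDigits16 (PySem.List.pyGetD digs r 0) ' '

def solution_alt (n : Int) (t : Int) (m : Int) (p : Int) : String :=
  String.ofList ((PySem.List.pyRange 0 t 1).map (fun i => pvCharAt n (p - 1 + i * m)))

-- ===== PRECONDITION & SPEC =====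
-- Pre_ admits (a) the problem's stated domain (base 2..16, t,m >= 1, 1 <= p <= m) and (b) the
-- degenerate inputs t <= 0 on which A's answer loop never runs and A returns '' (the extra
-- conditions in (b) only rule out inputs where A's build loop raises or diverges first:
-- n = 0 divides by zero, n = 1 loops forever, n <= -18 and n >= 17 hit arr out of range once
-- the target length forces a number with such a digit). Outside Pre_ A raises IndexError/
-- ZeroDivisionError or diverges, except for some inputs (e.g. p > m, or n outside 2..16 with
-- t >= 1) where A's over-built string happens to cover the index; those corners are excluded
-- as outside the problem's own constraints.
def Pre_solution (n : Int) (t : Int) (m : Int) (p : Int) : Prop :=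
  (2 ≤ n ∧ n ≤ 16 ∧ 1 ≤ t ∧ 1 ≤ m ∧ 1 ≤ p ∧ p ≤ m) ∨
  (t ≤ 0 ∧ (m * t ≤ 0 ∨ (2 ≤ n ∧ n ≤ 16) ∨ (-17 ≤ n ∧ n ≤ -1) ∨ (17 ≤ n ∧ m * t ≤ 15)))
instance (n : Int) (t : Int) (m : Int) (p : Int) : Decidable (Pre_solution n t m p) := by
  unfold Pre_solution; infer_instance

def pvWitness_solution : Int × Int × Int × Int := (2, 4, 2, 1)

def Spec_solution (n : Int) (t : Int) (m : Int) (p : Int) (out : String) : Prop :=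
  out = solution_alt n t m p
instance (n : Int) (t : Int) (m : Int) (p : Int) (out : String) :
    Decidable (Spec_solution n t m p out) := by unfold Spec_solution; infer_instance

-- ===== CLAIM (what is proved, stated in full; the proofs are below) =====
def Claim_equal_solution : Prop :=
  ∀ (n : Int) (t : Int) (m : Int) (p : Int), Dom_solution n t m p →
    Pre_solution n t m p → Spec_solution n t m p (solution n t m p)

-- ===== LEMMAS AND PROOFS =====

lemma pvToDigitsCore_eq : ∀ (fuel k : Nat) (ds : List Char), 0 < k → k < 10 ^ fuel →
    Nat.toDigitsCore 10 fuel k ds = ((Nat.digits 10 k).map Nat.digitChar).reverse ++ ds := by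
  intro fuel
  induction fuel with
  | zero => intro k ds hk hlt; simp at hlt; omega
  | succ fuel ih =>
    intro k ds hk hlt
    rw [Nat.toDigitsCore]
    by_cases h0 : k / 10 = 0
    · simp [h0, Nat.digits_def' (b := 10) (by norm_num) hk]
    · rw [if_neg h0, ih (k / 10) _ (Nat.pos_of_ne_zero h0)
        (by rw [Nat.div_lt_iff_lt_mul (by norm_num)]; omega)]
      rw [Nat.digits_def' (b := 10) (by norm_num) hk]
      simp

lemma pvToChars_eq (num : Int) (h : 0 < num) :
    PySem.Int.toChars num = ((Nat.digits 10 num.toNat).map Nat.digitChar).reverse := by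
  have hb : num.toNat < 10 ^ (num.toNat + 1) := by
    have h1 : num.toNat < 2 ^ num.toNat := Nat.lt_two_pow_self
    have h2 : (2:Nat) ^ num.toNat ≤ 10 ^ num.toNat := Nat.pow_le_pow_left (by norm_num) _
    have h3 : (10:Nat) ^ num.toNat ≤ 10 ^ (num.toNat + 1) := Nat.pow_le_pow_right (by norm_num) (by omega)
    omega
  rw [PySem.Int.toChars, if_neg (by omega), Nat.toDigits,
    pvToDigitsCore_eq _ _ _ (by omega) hb]
  simp

def pvChar (d : Nat) : Char := pvDigits16.getD d ' '

def pvRep (N k : Nat) : List Char :=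
  if k = 0 then ['0'] else ((Nat.digits N k).map pvChar).reverse

def pvCat (N K : Nat) : List Char := (List.range K).flatMap (pvRep N)

lemma pvChar_digitChar (d : Nat) (h : d < 10) : Nat.digitChar d = pvChar d := by
  interval_cases d <;> rfl

lemma pvArrA_getD (d : Nat) (h : d < 16) :
    PySem.List.pyGetD pvArrA ((d : Nat) : Int) [] = [pvChar d] := by
  rw [PySem.List.pyGetD_natCast]
  interval_cases d <;> rfl

lemma pvMakeStrLoop_eq (N : Nat) (h2 : 2 ≤ N) (h16 : N ≤ 16) :
    ∀ (fuel k : Nat) (answer : List Char), k < 2 ^ fuel →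
    pvMakeStrLoop ((N : Nat) : Int) fuel ((k : Nat) : Int) answer
      = answer ++ (Nat.digits N k).map pvChar := by
  intro fuel
  induction fuel with
  | zero => intro k answer hk; interval_cases k; simp [pvMakeStrLoop]
  | succ fuel ih =>
    intro k answer hk
    rw [pvMakeStrLoop]
    by_cases h0 : 0 < k
    · have hmod : k % N < 16 := by
        have := Nat.mod_lt k (show 0 < N by omega); omega
      have hdiv : k / N < 2 ^ fuel := by
        rw [Nat.div_lt_iff_lt_mul (by omega)]
        have h22 : 2 ^ fuel * 2 ≤ 2 ^ fuel * N := Nat.mul_le_mul_left _ h2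
        have : k < 2 ^ fuel * 2 := by rw [← pow_succ]; exact hk
        omega
      rw [if_pos (by exact_mod_cast h0), PySem.Int.mod_natCast, PySem.Int.floordiv_natCast,
        pvArrA_getD (k % N) hmod, ih (k / N) _ hdiv,
        Nat.digits_def' (b := N) (by omega) h0]
      simp
    · rw [if_neg (by omega)]
      have : k = 0 := by omega
      simp [this]

lemma pvMakeStr_eq (N k : Nat) (h2 : 2 ≤ N) (h16 : N ≤ 16) :
    pvMakeStr ((k : Nat) : Int) ((N : Nat) : Int) = pvRep N k := by
  rw [pvMakeStr, pvRep]
  by_cases hk : k = 0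
  · simp [hk]
  · rw [if_neg (by exact_mod_cast hk), if_neg hk]
    by_cases h10 : N = 10
    · rw [if_pos (by rw [h10]; norm_num), pvToChars_eq _ (by omega)]
      subst h10
      simp only [Int.toNat_natCast]
      congr 1
      exact List.map_congr_left (fun d hd => pvChar_digitChar d (Nat.digits_lt_base (by norm_num) hd))
    · rw [if_neg (by exact_mod_cast h10),
        pvMakeStrLoop_eq N h2 h16 _ k [] (by simp only [Int.toNat_natCast]; have : k < 2 ^ k := Nat.lt_two_pow_self; have : (2:Nat) ^ k ≤ 2 ^ (k+1) := Nat.pow_le_pow_right (by norm_num) (by omega); omega)]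
      simp
lemma pvRep_length (N k : Nat) (h2 : 2 ≤ N) : (pvRep N k).length = Nat.log N k + 1 := by
  rw [pvRep]
  by_cases hk : k = 0
  · simp [hk]
  · rw [if_neg hk]
    simp [Nat.digits_len N k (by omega) hk]

lemma pvRep_length_one (N k : Nat) (h2 : 2 ≤ N) (h : k < N) : (pvRep N k).length = 1 := by
  rw [pvRep_length N k h2, Nat.log_eq_zero_iff.mpr (Or.inl h)]

lemma pvRep_length_block (N D k : Nat) (h2 : 2 ≤ N) (hD : 1 ≤ D)
    (hlo : N ^ (D - 1) ≤ k) (hhi : k < N ^ D) : (pvRep N k).length = D := by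
  rw [pvRep_length N k h2]
  have : D - 1 + 1 = D := by omega
  rw [Nat.log_eq_of_pow_le_of_lt_pow hlo (by rw [this]; exact hhi)]
  omega

lemma pvCat_succ (N K : Nat) : pvCat N (K + 1) = pvCat N K ++ pvRep N K := by
  rw [pvCat, pvCat, List.range_succ, List.flatMap_append]
  simp

lemma pvRep_ne_nil (N k : Nat) : pvRep N k ≠ [] := by
  rw [pvRep]
  by_cases hk : k = 0
  · simp [hk]
  · rw [if_neg hk]
    simp [Nat.digits_ne_nil_iff_ne_zero.mpr hk]

lemma pvCat_len_mono (N : Nat) {a b : Nat} (h : a ≤ b) :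
    (pvCat N a).length ≤ (pvCat N b).length := by
  induction b with
  | zero => have : a = 0 := by omega
            simp [this]
  | succ b ih =>
    by_cases hab : a = b + 1
    · subst hab; exact le_refl _
    · have := ih (by omega)
      rw [pvCat_succ]
      simp only [List.length_append]
      omega

lemma pvCat_run (N a L : Nat) : ∀ (c : Nat),
    (∀ k, a ≤ k → k < a + c → (pvRep N k).length = L) →
    (pvCat N (a + c)).length = (pvCat N a).length + c * L := by
  intro c
  induction c with
  | zero => simp
  | succ c ih =>
    intro h
    have : a + (c + 1) = (a + c) + 1 := by omega
    rw [this, pvCat_succ, List.length_append, ih (fun k hk1 hk2 => h k hk1 (by omega)),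
      h (a + c) (by omega) (by omega)]
    ring

lemma pvCat_getD (N q : Nat) : ∀ (K r : Nat), q < K → r < (pvRep N q).length → ∀ (c : Char),
    (pvCat N K).getD ((pvCat N q).length + r) c = (pvRep N q).getD r c := by
  intro K
  induction K with
  | zero => omega
  | succ K ih =>
    intro r hq hr c
    by_cases hqK : q = K
    · subst hqK
      rw [pvCat_succ, List.getD_append_right _ _ _ _ (by omega), Nat.add_sub_cancel_left]
    · have hlt : (pvCat N q).length + r < (pvCat N K).length := by
        have h1 : (pvCat N (q+1)).length ≤ (pvCat N K).length := pvCat_len_mono N (by omega)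
        rw [pvCat_succ, List.length_append] at h1
        omega
      rw [pvCat_succ, List.getD_append _ _ _ _ hlt, ih r (by omega) hr c]
lemma pvCat_zero (N : Nat) : pvCat N 0 = [] := by simp [pvCat]

lemma pvWalk_spec (N : Nat) (h2 : 2 ≤ N) :
    ∀ (fuel I D S C : Nat), 1 ≤ D → I < fuel →
    (D = 1 ∧ S = 0 ∧ C = N ∨ 2 ≤ D ∧ S = N ^ (D - 1) ∧ C = N ^ (D - 1) * (N - 1)) →
    ∃ I' D' S' C' : Nat,
      pvWalk ((N : Nat) : Int) fuel ((I : Nat) : Int) ((D : Nat) : Int) ((S : Nat) : Int)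
          ((C : Nat) : Int) = (((I' : Nat) : Int), ((D' : Nat) : Int), ((S' : Nat) : Int)) ∧
      1 ≤ D' ∧
      (D' = 1 ∧ S' = 0 ∧ C' = N ∨ 2 ≤ D' ∧ S' = N ^ (D' - 1) ∧ C' = N ^ (D' - 1) * (N - 1)) ∧
      I' < C' * D' ∧
      (pvCat N S').length + I' = (pvCat N S).length + I := by
  intro fuel
  induction fuel with
  | zero => intro I D S C hD hI hinv; omega
  | succ fuel ih =>
    intro I D S C hD hI hinv
    rw [pvWalk]
    by_cases hcond : C * D ≤ I
    · rw [if_pos (by exact_mod_cast hcond)]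
      rcases hinv with ⟨hD1, hS, hC⟩ | ⟨hD2, hS, hC⟩
      · -- current block is d = 1 (numbers 0..N-1)
        rw [hD1, hS, hC]
        rw [show ((0 : Nat) : Int) = 0 from rfl, if_pos rfl]
        have hCN : C * D = N := by rw [hC, hD1]; ring
        have harg1 : ((I : Int) - (N : Int) * ((1 : Nat) : Int)) = ((I - N : Nat) : Int) := by
          rw [Nat.cast_sub (by omega)]; push_cast; ring
        have harg2 : (((1 : Nat) : Int) + 1) = (((2 : Nat)) : Int) := by norm_num
        have harg3 : ((N : Int) * ((N : Int) - 1)) = ((N * (N - 1) : Nat) : Int) := by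
          rw [Nat.cast_mul, Nat.cast_sub (by omega)]; push_cast; ring
        rw [harg1, harg2, harg3]
        obtain ⟨I', D', S', C', heq, hD', hinv', hlt', hlen'⟩ :=
          ih (I - N) 2 N (N * (N - 1)) (by omega) (by omega)
            (Or.inr ⟨le_refl 2, by simp, by simp⟩)
        refine ⟨I', D', S', C', heq, hD', hinv', hlt', ?_⟩
        have hrun : (pvCat N (0 + N)).length = (pvCat N 0).length + N * 1 :=
          pvCat_run N 0 1 N (fun k _ hk2 => pvRep_length_one N k h2 (by omega))
        rw [pvCat_zero] at hrun
        simp only [Nat.zero_add, List.length_nil] at hrun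
        rw [pvCat_zero]
        simp only [List.length_nil]
        omega
      · -- current block is d ≥ 2 (numbers N^(d-1)..N^d-1)
        have h1 : 1 ≤ N ^ (D - 1) := Nat.one_le_pow _ _ (by omega)
        have hSpos : 0 < S := by omega
        have hSne : ¬ ((S : Int) = 0) := by
          simp only [Nat.cast_eq_zero]; omega
        have hpow : S * N = N ^ D := by
          rw [hS, ← pow_succ]; congr 1; omega
        have hC1 : 1 ≤ C := by rw [hC]; exact Nat.mul_pos (by omega) (by omega)
        have hCD2 : 2 ≤ C * D := by
          calc 2 = 1 * 2 := by omega
            _ ≤ C * D := Nat.mul_le_mul hC1 hD2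
        have harg1 : ((I : Int) - (C : Int) * (D : Int)) = ((I - C * D : Nat) : Int) := by
          rw [Nat.cast_sub (by omega)]; push_cast; ring
        have harg2 : ((D : Int) + 1) = (((D + 1 : Nat)) : Int) := by push_cast; ring
        have harg3 : ((S : Int) * (N : Int)) = ((N ^ D : Nat) : Int) := by
          rw [← hpow]; push_cast; ring
        have harg4 : (((N ^ D : Nat) : Int)) * ((N : Int) - 1)
            = ((N ^ D * (N - 1) : Nat) : Int) := by
          rw [Nat.cast_mul, Nat.cast_sub (by omega)]; push_cast; ring
        rw [if_neg hSne, harg1, harg2, harg3, harg4]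
        have hSC : S + C = N ^ D := by
          rw [hS, hC]
          calc N ^ (D-1) + N ^ (D-1) * (N-1) = N ^ (D-1) * (1 + (N-1)) := by ring
            _ = N ^ (D-1) * N := by congr 1; omega
            _ = N ^ D := by rw [← pow_succ]; congr 1; omega
        obtain ⟨I', D', S', C', heq, hD', hinv', hlt', hlen'⟩ :=
          ih (I - C * D) (D + 1) (N ^ D) (N ^ D * (N - 1)) (by omega) (by omega)
            (Or.inr ⟨by omega, by rw [Nat.add_sub_cancel], by rw [Nat.add_sub_cancel]⟩)
        refine ⟨I', D', S', C', heq, hD', hinv', hlt', ?_⟩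
        have hrun : (pvCat N (S + C)).length = (pvCat N S).length + C * D := by
          apply pvCat_run N S D C
          intro k hk1 hk2
          exact pvRep_length_block N D k h2 (by omega) (by omega) (by omega)
        rw [hSC] at hrun
        omega
    · rw [if_neg (by exact_mod_cast hcond)]
      exact ⟨I, D, S, C, rfl, hD, hinv, by omega, rfl⟩
lemma pvDigsLoop_eq (N : Nat) (h2 : 2 ≤ N) :
    ∀ (fuel k : Nat) (digs : List Int), k < 2 ^ fuel →
    pvDigsLoop ((N : Nat) : Int) fuel ((k : Nat) : Int) digs
      = digs ++ (Nat.digits N k).map (fun d => ((d : Nat) : Int)) := by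
  intro fuel
  induction fuel with
  | zero => intro k digs hk; interval_cases k; simp [pvDigsLoop]
  | succ fuel ih =>
    intro k digs hk
    rw [pvDigsLoop]
    by_cases h0 : 0 < k
    · have hdiv : k / N < 2 ^ fuel := by
        rw [Nat.div_lt_iff_lt_mul (by omega)]
        have h22 : 2 ^ fuel * 2 ≤ 2 ^ fuel * N := Nat.mul_le_mul_left _ h2
        have : k < 2 ^ fuel * 2 := by rw [← pow_succ]; exact hk
        omega
      rw [if_pos (by exact_mod_cast h0), PySem.Int.mod_natCast, PySem.Int.floordiv_natCast,
        ih (k / N) _ hdiv, Nat.digits_def' (b := N) (by omega) h0]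
      simp
    · rw [if_neg (by omega)]
      have : k = 0 := by omega
      simp [this]

lemma pvGetD_map_of_lt {α β : Type} (f : α → β) (l : List α) (R : Nat) (h : R < l.length)
    (d : α) (d' : β) : (l.map f).getD R d' = f (l.getD R d) := by
  rw [List.getD_eq_getElem _ _ (by simpa using h), List.getElem_map,
    List.getD_eq_getElem _ _ h]

lemma pvBlock_sum (N D : Nat) (h2 : 2 ≤ N) (hD : 1 ≤ D) :
    N ^ (D - 1) + N ^ (D - 1) * (N - 1) = N ^ D := by
  calc N ^ (D-1) + N ^ (D-1) * (N-1) = N ^ (D-1) * (1 + (N-1)) := by ring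
    _ = N ^ (D-1) * N := by congr 1; omega
    _ = N ^ D := by rw [← pow_succ]; congr 1; omega

lemma pvCharAt_eq (N : Nat) (h2 : 2 ≤ N) (h16 : N ≤ 16) (I K : Nat)
    (hK : I < (pvCat N K).length) :
    pvCharAt ((N : Nat) : Int) ((I : Nat) : Int) = (pvCat N K).getD I ' ' := by
  obtain ⟨I', D', S', C', heq, hD', hinv', hlt', hlen'⟩ :=
    pvWalk_spec N h2 (I + 1) I 1 0 N (le_refl 1) (by omega) (Or.inl ⟨rfl, rfl, rfl⟩)
  have heq' : pvWalk ((N : Int)) (((I : Int)).toNat + 1) ((I : Int)) 1 0 ((N : Int))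
      = (((I' : Nat) : Int), ((D' : Nat) : Int), ((S' : Nat) : Int)) := by
    have e1 : (((1:Nat)):Int) = (1:Int) := by norm_num
    have e0 : (((0:Nat)):Int) = (0:Int) := by norm_num
    rw [← e1, ← e0, Int.toNat_natCast]
    exact heq
  rw [pvCharAt]
  simp only [heq', PySem.Int.floordiv_natCast, PySem.Int.mod_natCast]
  set Q := S' + I' / D' with hQ
  set R := I' % D' with hR
  have hD'0 : 0 < D' := hD'
  have hRD : R < D' := Nat.mod_lt _ hD'0
  have hdivC : I' / D' < C' := by
    rw [Nat.div_lt_iff_lt_mul hD'0]; exact hlt'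
  -- every number in [S', Q] lies in block D'
  have hblock : ∀ k, S' ≤ k → k ≤ Q → (pvRep N k).length = D' := by
    intro k hk1 hk2
    rcases hinv' with ⟨hd1, hs0, hcN⟩ | ⟨hd2, hsP, hcP⟩
    · have hCD : C' * D' = N := by rw [hcN, hd1]; ring
      have hdle : I' / D' ≤ I' := Nat.div_le_self _ _
      rw [hd1]
      exact pvRep_length_one N k h2 (by omega)
    · have hSC : S' + C' = N ^ D' := by rw [hsP, hcP]; exact pvBlock_sum N D' h2 (by omega)
      exact pvRep_length_block N D' k h2 (by omega) (by omega) (by omega)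
  have hlenQ : (pvCat N Q).length = (pvCat N S').length + (I' / D') * D' := by
    rw [hQ]
    exact pvCat_run N S' D' (I' / D') (fun k hk1 hk2 => hblock k hk1 (by omega))
  have hI0 : (pvCat N S').length + I' = I := by
    rw [pvCat_zero] at hlen'; simpa using hlen'
  have hIdecomp : (pvCat N Q).length + R = I := by
    have : I' = (I' / D') * D' + R := by rw [hR, Nat.mul_comm]; exact (Nat.div_add_mod I' D').symm
    omega
  have hSQ : S' ≤ Q := by rw [hQ]; exact Nat.le_add_right _ _
  have hQrep : R < (pvRep N Q).length := by rw [hblock Q hSQ (le_refl Q)]; exact hRD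
  have hQK : Q < K := by
    by_contra h
    have := pvCat_len_mono N (show K ≤ Q by omega)
    omega
  have hRHS : (pvCat N K).getD I ' ' = (pvRep N Q).getD R ' ' := by
    rw [← hIdecomp]; exact pvCat_getD N Q K R hQK hQrep ' '
  rw [hRHS]
  -- now evaluate B's digit extraction
  have hsum : ((S' : Int)) + ((I' / D' : Nat) : Int) = ((Q : Nat) : Int) := by
    simp only [hQ]; push_cast; ring
  rw [hsum]
  by_cases hQ0 : Q = 0
  · have hI'0 : I' = 0 := by
      rcases hinv' with ⟨hd1, hs0, hcN⟩ | ⟨hd2, hsP, hcP⟩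
      · have hdd : I' / D' = I' := by rw [hd1, Nat.div_one]
        omega
      · have h1 : 1 ≤ N ^ (D' - 1) := Nat.one_le_pow _ _ (by omega)
        omega
    have hR0 : R = 0 := by rw [hR, hI'0]; simp
    rw [if_pos (by rw [hQ0]; norm_num)]
    rw [hQ0, hR0]
    rfl
  · rw [if_neg (by exact_mod_cast hQ0)]
    have hfuel : Q < 2 ^ (((Q : Int)).toNat + 1) := by
      simp only [Int.toNat_natCast]
      have h1 : Q < 2 ^ Q := Nat.lt_two_pow_self
      have h2' : (2:Nat) ^ Q ≤ 2 ^ (Q + 1) := Nat.pow_le_pow_right (by norm_num) (Nat.le_succ _)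
      exact lt_of_lt_of_le h1 h2'
    rw [pvDigsLoop_eq N h2 _ Q [] hfuel]
    simp only [List.nil_append]
    have hlenD : (Nat.digits N Q).length = D' := by
      have := hblock Q hSQ (le_refl Q)
      rw [pvRep] at this
      rw [if_neg hQ0] at this
      simpa using this
    have hrev : ((Nat.digits N Q).map (fun d => ((d : Nat) : Int))).reverse
        = ((Nat.digits N Q).reverse).map (fun d => ((d : Nat) : Int)) := by
      rw [List.map_reverse]
    rw [hrev]
    have hRlen : R < ((Nat.digits N Q).reverse).length := by
      rw [List.length_reverse, hlenD]; exact hRD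
    rw [PySem.List.pyGetD_natCast, pvGetD_map_of_lt _ _ R hRlen 0 0,
      PySem.List.pyGetD_natCast]
    have hdig : (Nat.digits N Q).reverse.getD R 0 < 16 := by
      have hmem : (Nat.digits N Q).reverse.getD R 0 ∈ Nat.digits N Q := by
        rw [List.getD_eq_getElem _ _ hRlen]
        exact List.mem_reverse.mp (List.getElem_mem _)
      have := Nat.digits_lt_base (by omega) hmem
      omega
    rw [pvRep, if_neg hQ0, ← List.map_reverse]
    rw [pvGetD_map_of_lt _ _ R hRlen 0 ' ']
    rfl
lemma pvBuildLoop_spec (N MT : Nat) (h2 : 2 ≤ N) (h16 : N ≤ 16) :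
    ∀ (fuel K : Nat), MT + 1 ≤ (pvCat N K).length + fuel →
    ∃ Kf : Nat, pvBuildLoop ((N : Nat) : Int) ((MT : Nat) : Int) fuel ((K : Nat) : Int)
        (pvCat N K) = pvCat N Kf ∧ MT < (pvCat N Kf).length := by
  intro fuel
  induction fuel with
  | zero =>
    intro K h
    rw [pvBuildLoop]
    exact ⟨K, rfl, by omega⟩
  | succ fuel ih =>
    intro K h
    rw [pvBuildLoop]
    by_cases hlen : (pvCat N K).length ≤ MT
    · rw [if_pos (by exact_mod_cast hlen)]
      have hK1 : ((K : Int)) + 1 = ((K + 1 : Nat) : Int) := by push_cast; ring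
      rw [hK1, pvMakeStr_eq N K h2 h16, ← pvCat_succ]
      apply ih (K + 1)
      have hs : (pvCat N (K+1)).length = (pvCat N K).length + (pvRep N K).length := by
        rw [pvCat_succ]; simp
      have hpos : 0 < (pvRep N K).length := List.length_pos_of_ne_nil (pvRep_ne_nil N K)
      omega
    · rw [if_neg (by exact_mod_cast hlen)]
      exact ⟨K, rfl, by omega⟩

lemma pvPickLoop_eq (t m p : Int) (string : List Char) (T : Nat) (hT : t = (T : Int)) :
    ∀ (fuel c : Nat) (ans : List Char), ans.length = c → T ≤ c + fuel →
    pvPickLoop t m p string fuel ((c : Nat) : Int) ans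
      = ans ++ (List.range (T - c)).map
          (fun i => PySem.List.pyGetD string (p - 1 + (((c + i : Nat) : Int)) * m) ' ') := by
  intro fuel
  induction fuel with
  | zero =>
    intro c ans hlen hfc
    rw [pvPickLoop]
    have : T - c = 0 := by omega
    simp [this]
  | succ fuel ih =>
    intro c ans hlen hfc
    rw [pvPickLoop]
    by_cases hc : c < T
    · rw [if_pos (by rw [hlen, hT]; exact_mod_cast hc)]
      have h1 : ((c : Int)) + 1 = ((c + 1 : Nat) : Int) := by push_cast; ring
      rw [h1, ih (c + 1) _ (by simp [hlen]) (by omega), List.append_assoc]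
      congr 1
      have hTc : T - c = (T - (c + 1)) + 1 := by omega
      rw [hTc, List.range_succ_eq_map]
      simp only [List.map_cons, List.map_map, List.singleton_append]
      congr 1
      apply List.map_congr_left
      intro a _
      have hca : c + 1 + a = c + (a + 1) := by omega
      simp [Function.comp, hca]
    · rw [if_neg (by rw [hlen, hT]; exact_mod_cast hc)]
      have : T - c = 0 := by omega
      simp [this]

theorem pvSolution_eq_alt : ∀ (n t m p : Int),
    (2 ≤ n ∧ n ≤ 16 ∧ 1 ≤ t ∧ 1 ≤ m ∧ 1 ≤ p ∧ p ≤ m) →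
    solution n t m p = solution_alt n t m p := by
  intro n t m p hpre
  obtain ⟨hn2, hn16, ht1, hm1, hp1, hpm⟩ := hpre
  set N := n.toNat with hNdef
  have hn : n = ((N : Nat) : Int) := by omega
  have hN2 : 2 ≤ N := by omega
  have hN16 : N ≤ 16 := by omega
  set T := t.toNat with hTdef
  have ht : t = ((T : Nat) : Int) := by omega
  set MT := (m * t).toNat with hMTdef
  have hmtpos : 1 ≤ m * t := by nlinarith
  have hmt : m * t = ((MT : Nat) : Int) := by omega
  rw [solution, solution_alt]
  obtain ⟨Kf, hbe, hblen⟩ :=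
    pvBuildLoop_spec N MT hN2 hN16 (MT + 2) 0 (by rw [pvCat_zero]; simp)
  have hbe' : pvBuildLoop n (m * t) ((m * t).toNat + 2) 0 [] = pvCat N Kf := by
    rw [hn, hmt, Int.toNat_natCast,
      show (0 : Int) = ((0 : Nat) : Int) from rfl, show ([] : List Char) = pvCat N 0 from (pvCat_zero N).symm]
    exact hbe
  rw [hbe']
  have hpick := pvPickLoop_eq t m p (pvCat N Kf) T ht (T + 1) 0 [] rfl (by omega)
  have hfuel : t.toNat + 1 = T + 1 := rfl
  rw [hfuel, show (0 : Int) = ((0 : Nat) : Int) from rfl, hpick]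
  congr 1
  rw [PySem.List.pyRange_one]
  simp only [List.nil_append, List.map_map, Nat.sub_zero]
  have hTt : (t - ((0 : Nat) : Int)).toNat = T := by push_cast; omega
  rw [hTt]
  apply List.map_congr_left
  intro i hi
  have hiT : i < T := List.mem_range.mp hi
  simp only [Nat.cast_zero, zero_add, Function.comp]
  have hiI : (i : Int) < (T : Int) := by exact_mod_cast hiT
  have him : (i : Int) * m ≤ ((T : Int) - 1) * m :=
    mul_le_mul_of_nonneg_right (by omega) (by omega)
  have h3 : ((T : Int) - 1) * m = (T : Int) * m - m := by ring
  have h4 : (T : Int) * m = m * t := by rw [ht]; ring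
  have hidx0 : 0 ≤ p - 1 + (i : Int) * m := by
    have := mul_nonneg (show (0:Int) ≤ (i : Int) by positivity) (show (0:Int) ≤ m by omega)
    omega
  have hlt : p - 1 + (i : Int) * m < ((MT : Nat) : Int) := by omega
  have hIeq : p - 1 + (i : Int) * m = (((p - 1 + (i : Int) * m).toNat : Nat) : Int) := by omega
  have hltN : (p - 1 + (i : Int) * m).toNat < (pvCat N Kf).length := by omega
  rw [PySem.List.pyGetD_of_nonneg _ _ hidx0, hn]
  conv_rhs => rw [hIeq]
  rw [pvCharAt_eq N hN2 hN16 _ Kf hltN]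

lemma pvSolution_trivial (n t m p : Int) (ht : t ≤ 0) :
    solution n t m p = solution_alt n t m p := by
  rw [solution, solution_alt]
  have h0 : t.toNat = 0 := by omega
  rw [h0, PySem.List.pyRange_one_eq_nil (by omega : t ≤ 0)]
  simp [pvPickLoop, show ¬((0 : Int) < t) by omega]

-- ===== VERDICT (by name: the statement is the Claim_ definition above) =====
theorem solution_spec : Claim_equal_solution := by
  intro n t m p _ hpre
  show solution n t m p = solution_alt n t m p
  rcases hpre with h | h
  · exact pvSolution_eq_alt n t m p h
  · exact pvSolution_trivial n t m p h.1
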